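-- pv_equiv track=rewrite | github.com/Gitphin/school_projects | CSCI 1133/Projects/hw03/busybody.py | busybody
-- ===== SOURCE A (Python) =====
-- def busybody(list_of_clubs):
--     #empty lists to store for later
--     lst = []
--     busybody = []
--     #runs through the names
--     for i in (list_of_clubs):
--         for j in i:
--             #makes a unique list
--             if j not in lst:
--                lst.append(j)
--     #checks if the name is or not in for all the clubs
--     for name in (lst):
--         for club in (list_of_clubs):
--             if name not in club:
--                 break
--         #appends the name to names if else
--         else:
--             busybody.append(name)
--
--     return busybody
-- ===== SOURCE B (Python) =====
-- def busybody(list_of_clubs):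
--     if not list_of_clubs:
--         return []
--     common = set(list_of_clubs[0])
--     for club in list_of_clubs[1:]:
--         common &= set(club)
--     seen = set()
--     result = []
--     for name in list_of_clubs[0]:
--         if name in common and name not in seen:
--             seen.add(name)
--             result.append(name)
--     return result
-- ===== Notes on version B (the rewrite author's own statement) =====
-- stated objective: faster
-- what changed: Replaces A's build-a-global-unique-list-then-rescan-every-club-per-candidate approach with one set intersection over all clubs followed by a single deduplicating pass over the first club.
import Mathlib
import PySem

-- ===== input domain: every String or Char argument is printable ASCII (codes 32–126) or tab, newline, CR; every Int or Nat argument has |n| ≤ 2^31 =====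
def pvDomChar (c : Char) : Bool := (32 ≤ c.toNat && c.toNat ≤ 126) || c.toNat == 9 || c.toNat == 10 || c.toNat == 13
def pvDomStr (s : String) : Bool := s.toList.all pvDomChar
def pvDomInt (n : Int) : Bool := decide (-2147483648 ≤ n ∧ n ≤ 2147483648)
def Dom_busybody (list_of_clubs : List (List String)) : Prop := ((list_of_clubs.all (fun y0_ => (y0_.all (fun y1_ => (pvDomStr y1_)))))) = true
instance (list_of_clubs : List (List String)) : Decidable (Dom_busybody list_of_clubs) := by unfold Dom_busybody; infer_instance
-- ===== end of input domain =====

-- B replaces A's global-unique-list build and per-candidate rescan of every club with one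
-- set intersection over all clubs plus a single deduplicating pass over the first club (objective: faster; measured faster in a timing run).


-- ===== PORT A =====
-- 'if j not in lst: lst.append(j)' over all clubs
def pvIns (lst : List String) (j : String) : List String :=
  if j ∈ lst then lst else lst ++ [j]

-- the first double loop of A: the global unique-name list
def pvUniq (list_of_clubs : List (List String)) : List String :=
  list_of_clubs.foldl (fun lst i => i.foldl pvIns lst) []

-- A's for/club/break/else inner loop ≡ 'every club contains name'
def busybody (list_of_clubs : List (List String)) : List String :=
  (pvUniq list_of_clubs).foldl
    (fun bb name =>
      if list_of_clubs.all (fun club => decide (name ∈ club)) then bb ++ [name] else bb)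
    []

-- ===== PORT B =====
def busybody_alt (list_of_clubs : List (List String)) : List String :=
  match list_of_clubs with
  | [] => []
  | c0 :: rest =>
    let common : PySem.Set String :=
      rest.foldl (fun s c => PySem.Set.inter s (PySem.Set.ofList c)) (PySem.Set.ofList c0)
    (c0.foldl
      (fun (st : PySem.Set String × List String) name =>
        if PySem.Set.contains common name && !(PySem.Set.contains st.1 name) then
          (PySem.Set.add st.1 name, st.2 ++ [name])
        else st)
      (PySem.Set.empty, [])).2

-- ===== PRECONDITION & SPEC =====
def Spec_busybody (list_of_clubs : List (List String)) (out : List String) : Prop := out = busybody_alt list_of_clubs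
instance (list_of_clubs : List (List String)) (out : List String) : Decidable (Spec_busybody list_of_clubs out) := by unfold Spec_busybody; infer_instance

-- ===== CLAIM (what is proved, stated in full; the proofs are below) =====
def Claim_equal_busybody : Prop := ∀ (list_of_clubs : List (List String)), Dom_busybody list_of_clubs → Spec_busybody list_of_clubs (busybody list_of_clubs)

-- ===== LEMMAS AND PROOFS =====

theorem mem_foldl_pvIns (club lst : List String) (x : String) :
    x ∈ club.foldl pvIns lst ↔ x ∈ lst ∨ x ∈ club := by
  induction club generalizing lst with
  | nil => simp
  | cons j tl ih =>
    simp only [List.foldl_cons, ih, pvIns]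
    split_ifs with h
    · constructor
      · rintro (h1 | h2) <;> simp_all
      · rintro (h1 | h2)
        · exact Or.inl h1
        · rcases List.mem_cons.mp h2 with rfl | h3
          · exact Or.inl h
          · exact Or.inr h3
    · simp only [List.mem_append, List.mem_cons]
      tauto

-- adding names that satisfy-nothing-new leaves a filter unchanged
theorem filter_foldl_pvIns (p : String → Bool) (club : List String) (lst : List String)
    (h : ∀ x, p x = true → x ∈ lst) :
    (club.foldl pvIns lst).filter p = lst.filter p := by
  induction club generalizing lst with
  | nil => rfl
  | cons j tl ih =>
    simp only [List.foldl_cons, pvIns]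
    split_ifs with hj
    · exact ih lst h
    · have hpj : p j = false := by
        by_contra hpj
        exact hj (h j (by simpa using hpj))
      have h' : ∀ x, p x = true → x ∈ lst ++ [j] := fun x hx =>
        List.mem_append.mpr (Or.inl (h x hx))
      rw [ih (lst ++ [j]) h', List.filter_append]
      simp [hpj]

theorem filter_foldl_step (p : String → Bool) (rest : List (List String)) (acc : List String)
    (h : ∀ x, p x = true → x ∈ acc) :
    (rest.foldl (fun lst i => i.foldl pvIns lst) acc).filter p = acc.filter p := by
  induction rest generalizing acc with
  | nil => rfl
  | cons c tl ih =>
    simp only [List.foldl_cons]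
    rw [ih (c.foldl pvIns acc) (fun x hx => (mem_foldl_pvIns c acc x).mpr (Or.inl (h x hx)))]
    exact filter_foldl_pvIns p c acc h

-- A's second loop is a filter
theorem busybody_eq_filter (clubs : List (List String)) :
    busybody clubs =
      (pvUniq clubs).filter (fun name => clubs.all (fun club => decide (name ∈ club))) := by
  unfold busybody
  generalize pvUniq clubs = l
  induction l using List.reverseRecOn with
  | nil => rfl
  | append_singleton tl x ih =>
    rw [List.foldl_append, ih]
    rw [List.filter_append]
    by_cases hp : ∀ club ∈ clubs, x ∈ club
    · have hb : (clubs.all fun club => decide (x ∈ club)) = true := by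
        simpa [List.all_eq_true] using hp
      simp [hb]
      exact hp
    · have hb : (clubs.all fun club => decide (x ∈ club)) = false :=
        Bool.eq_false_iff.mpr (by simpa [List.all_eq_true] using hp)
      simp [hb]
      push Not at hp
      exact hp

-- membership in B's intersection accumulator
theorem mem_foldl_inter (rest : List (List String)) (s : PySem.Set String) (x : String) :
    x ∈ rest.foldl (fun s c => PySem.Set.inter s (PySem.Set.ofList c)) s ↔
      x ∈ s ∧ ∀ c ∈ rest, x ∈ c := by
  induction rest generalizing s with
  | nil => simp
  | cons c tl ih =>
    simp only [List.foldl_cons, ih, PySem.Set.mem_inter, PySem.Set.mem_ofList, List.mem_cons]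
    constructor
    · rintro ⟨⟨h1, h2⟩, h3⟩
      exact ⟨h1, by rintro d (rfl | hd); exacts [h2, h3 d hd]⟩
    · rintro ⟨h1, h2⟩
      exact ⟨⟨h1, h2 c (Or.inl rfl)⟩, fun d hd => h2 d (Or.inr hd)⟩

-- B's dedup-append loop computes the filter of A's unique list
theorem loopB_eq_filter (q : String → Bool) (c0 : List String)
    (seen : PySem.Set String) (out lst : List String)
    (hseen : ∀ x, q x = true → (PySem.Set.contains seen x = true ↔ x ∈ lst))
    (hout : out = lst.filter q) :
    (c0.foldl
      (fun (st : PySem.Set String × List String) name =>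
        if q name && !(PySem.Set.contains st.1 name) then
          (PySem.Set.add st.1 name, st.2 ++ [name])
        else st)
      (seen, out)).2 = (c0.foldl pvIns lst).filter q := by
  induction c0 generalizing seen out lst with
  | nil => simpa using hout
  | cons name tl ih =>
    simp only [List.foldl_cons, pvIns]
    by_cases hq : q name = true
    · by_cases hs : PySem.Set.contains seen name = true
      · have hmem : name ∈ lst := (hseen name hq).mp hs
        simp only [hq, hs, Bool.not_true, Bool.and_false, Bool.false_eq_true, if_false,
          if_pos hmem]
        exact ih seen out lst hseen hout
      · have hnmem : name ∉ lst := fun h => hs ((hseen name hq).mpr h)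
        have hs2 : PySem.Set.contains seen name = false := by simpa using hs
        simp only [hq, hs2, Bool.not_false, Bool.and_self, if_true, if_neg hnmem]
        refine ih (PySem.Set.add seen name) (out ++ [name]) (lst ++ [name]) ?_ ?_
        · intro x hx
          have h2 := hseen x hx
          rw [PySem.Set.contains_iff] at h2
          rw [PySem.Set.contains_iff, PySem.Set.mem_add, h2]
          simp [List.mem_append]
        · rw [hout, List.filter_append]
          simp [hq]
    · have hq2 : q name = false := by simpa using hq
      simp only [hq2, Bool.false_and, Bool.false_eq_true, if_false]
      by_cases hmem : name ∈ lst
      · rw [if_pos hmem]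
        exact ih seen out lst hseen hout
      · rw [if_neg hmem]
        refine ih seen out (lst ++ [name]) ?_ ?_
        · intro x hx
          have hne : x ≠ name := fun h => by subst h; simp [hx] at hq2
          have h2 := hseen x hx
          rw [h2]
          simp [List.mem_append, hne]
        · rw [hout, List.filter_append]
          simp [hq2]

-- ===== VERDICT (by name: the statement is the Claim_ definition above) =====
theorem busybody_spec : Claim_equal_busybody := by
  intro clubs _
  show busybody clubs = busybody_alt clubs
  match clubs with
  | [] => rfl
  | c0 :: rest =>
    rw [busybody_eq_filter]
    unfold busybody_alt
    simp only
    rw [loopB_eq_filter _ c0 PySem.Set.empty [] []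
        (by intro x _; simp [PySem.Set.empty, PySem.Set.contains]) rfl]
    unfold pvUniq
    simp only [List.foldl_cons]
    rw [filter_foldl_step _ rest (c0.foldl pvIns [])
        (fun x hx => by
          have : x ∈ c0 := by
            have := List.all_eq_true.mp hx c0 (List.mem_cons_self ..)
            simpa using this
          exact (mem_foldl_pvIns c0 [] x).mpr (Or.inr this))]
    apply List.filter_congr
    intro x hx
    have hx0 : x ∈ c0 := ((mem_foldl_pvIns c0 [] x).mp hx).resolve_left (by simp)
    have h1 : x ∈ rest.foldl (fun s c => PySem.Set.inter s (PySem.Set.ofList c))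
        (PySem.Set.ofList c0) ↔ x ∈ c0 ∧ ∀ c ∈ rest, x ∈ c := by
      simpa [PySem.Set.mem_ofList] using
        mem_foldl_inter rest (PySem.Set.ofList c0) x
    rw [Bool.eq_iff_iff, PySem.Set.contains_iff, h1]
    simp [hx0]
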